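-- pv_equiv track=rewrite | github.com/warriorframework/warriorframework | warrior/Framework/ClassUtils/testdata_class.py | repeat_per_td_block
-- ===== SOURCE A (Python) =====
-- from collections import OrderedDict
--
-- CMD_PARAMS = OrderedDict([("command_list", "send"),
--                           ("sys_list", "sys"),
--                           ("session_list", "session"),
--                           ("startprompt_list", "start"),
--                           ("endprompt_list", "end"),
--                           ("verify_list", "verify"),
--                           ("verify_text_list", "search"),
--                           ("verify_context_list", "found"),
--                           ("timeout_list", "timeout"),
--                           ("sleeptime_list", "sleep"),
--                           ("retry_list", "retry"),
--                           ("retry_timer_list", "retry_timer"),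
--                           ("retry_count_list", "retry_count"),
--                           ("retry_onmatch_list", "retry_onmatch"),
--                           ("resp_ref_list", "resp_ref"),
--                           ("resp_req_list", "resp_req"),
--                           ("resp_pat_req_list", "resp_pat_req"),
--                           ("resp_pat_key_list", "resp_pat_key"),
--                           ("resp_key_list", "resp_keys"),
--                           ("inorder_resp_ref_list", "inorder_resp_ref"),
--                           ("log_list", "monitor"),
--                           ("verify_on_list", "verify_on"),
--                           ("inorder_search_list", "inorder"),
--                           ("vc_file_list", ""),
--                           ("verify_map_list", ""),
--                           ("operator_list", "operator"),
--                           ("cond_value_list", "cond_value"),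
--                           ("cond_type_list", "cond_type"),
--                           ("sleeptime_before_match_list", "sleep_before_match"),
--                           ("return_on_fail_list", "return_on_fail"),
--                           ("logmsg_list", "log"),
--                           ("repeat_list", "repeat")])  # keep this in the last
--
-- def repeat_per_td_block(details_dict, cmd_loc_list):
--     """
--     Find the max iteration count(td block) from cmd_loc_list.
--     Expand all command values in details_dict for 'repeat_count'
--     times if repeat tag is 'yes'.
--     """
--     # Get repeat_count(largest delta between two consecutive
--     # values in cmd_loc_list) from cmd_loc_list
--     repeat_count = max(abs(val1 - val2) for (val1, val2) in\
--                        zip(cmd_loc_list[1:], cmd_loc_list[:-1]))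
--     repeat_list = details_dict['repeat_list']
--
--     for index, repeat_val in enumerate(repeat_list):
--         # Proceed only if repeat tag is 'y' and the command index is
--         # available in cmd_loc_list
--         if isinstance(repeat_val, str) and \
--          repeat_val.lower().startswith('y') and index in cmd_loc_list:
--             cmd_pos = cmd_loc_list.index(index) + 1
--             # Update cmd positions by adding repeat_count-1 to
--             # remaining values in cmd_loc_list
--             cmd_loc_list[cmd_pos:] = [val+repeat_count-1 for val in
--                                       cmd_loc_list[cmd_pos:]]
--             for param, _ in CMD_PARAMS.items():
--                 param_list = details_dict[param]
--                 element = param_list[index]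
--                 if param == 'repeat_list':
--                     element = None
--                 param_list[index:index+1] = [element]*repeat_count
--
--     return details_dict, cmd_loc_list
-- ===== SOURCE B (Python) =====
-- # B: single fixed-length scan of the original repeat_list with a cumulative offset,
-- # recording the firing positions once, then one independent rebuild pass per param,
-- # instead of A's enumerate over lists that are regrown in place while being scanned.
-- # Like A, mutates cmd_loc_list in place and rebinds details_dict entries; the
-- # proved equivalence is about the returned values.
-- from collections import OrderedDict
--
-- CMD_PARAMS = OrderedDict([("command_list", "send"),
--                           ("sys_list", "sys"),
--                           ("session_list", "session"),
--                           ("startprompt_list", "start"),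
--                           ("endprompt_list", "end"),
--                           ("verify_list", "verify"),
--                           ("verify_text_list", "search"),
--                           ("verify_context_list", "found"),
--                           ("timeout_list", "timeout"),
--                           ("sleeptime_list", "sleep"),
--                           ("retry_list", "retry"),
--                           ("retry_timer_list", "retry_timer"),
--                           ("retry_count_list", "retry_count"),
--                           ("retry_onmatch_list", "retry_onmatch"),
--                           ("resp_ref_list", "resp_ref"),
--                           ("resp_req_list", "resp_req"),
--                           ("resp_pat_req_list", "resp_pat_req"),
--                           ("resp_pat_key_list", "resp_pat_key"),
--                           ("resp_key_list", "resp_keys"),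
--                           ("inorder_resp_ref_list", "inorder_resp_ref"),
--                           ("log_list", "monitor"),
--                           ("verify_on_list", "verify_on"),
--                           ("inorder_search_list", "inorder"),
--                           ("vc_file_list", ""),
--                           ("verify_map_list", ""),
--                           ("operator_list", "operator"),
--                           ("cond_value_list", "cond_value"),
--                           ("cond_type_list", "cond_type"),
--                           ("sleeptime_before_match_list", "sleep_before_match"),
--                           ("return_on_fail_list", "return_on_fail"),
--                           ("logmsg_list", "log"),
--                           ("repeat_list", "repeat")])
--
-- def repeat_per_td_block(details_dict, cmd_loc_list):
--     repeat_count = max(abs(val1 - val2) for (val1, val2) in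
--                        zip(cmd_loc_list[1:], cmd_loc_list[:-1]))
--     repeat_list = details_dict['repeat_list']
--     positions = []
--     offset = 0
--     for i, val in enumerate(repeat_list):
--         if isinstance(val, str) and val.lower().startswith('y') \
--            and (i + offset) in cmd_loc_list:
--             positions.append(i)
--             pos = cmd_loc_list.index(i + offset) + 1
--             cmd_loc_list[pos:] = [v + repeat_count - 1
--                                   for v in cmd_loc_list[pos:]]
--             offset += repeat_count - 1
--     if positions:
--         pos_set = set(positions)
--         for param in CMD_PARAMS:
--             plist = details_dict[param]
--             out = []
--             for p, element in enumerate(plist):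
--                 if p in pos_set:
--                     out.extend([None if param == 'repeat_list' else element]
--                                * repeat_count)
--                 else:
--                     out.append(element)
--             details_dict[param] = out
--     return details_dict, cmd_loc_list
-- ===== Notes on version B (the rewrite author's own statement) =====
-- stated objective: alternative
-- what changed: B scans the original repeat_list once at fixed length with a cumulative offset to record firing positions (instead of A's enumerate over a list that is regrown in place while being scanned), then rebuilds each CMD_PARAMS list in one independent pass over that position set, replacing A's per-firing slice-rewrite of all 32 lists; Pre_ excludes cmd_loc_list whose entries are all equal (repeat count 0), where expanding a block zero times is not meaningful and the resulting deletions of A and B are both unspecified corner behaviour.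
import Mathlib
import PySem

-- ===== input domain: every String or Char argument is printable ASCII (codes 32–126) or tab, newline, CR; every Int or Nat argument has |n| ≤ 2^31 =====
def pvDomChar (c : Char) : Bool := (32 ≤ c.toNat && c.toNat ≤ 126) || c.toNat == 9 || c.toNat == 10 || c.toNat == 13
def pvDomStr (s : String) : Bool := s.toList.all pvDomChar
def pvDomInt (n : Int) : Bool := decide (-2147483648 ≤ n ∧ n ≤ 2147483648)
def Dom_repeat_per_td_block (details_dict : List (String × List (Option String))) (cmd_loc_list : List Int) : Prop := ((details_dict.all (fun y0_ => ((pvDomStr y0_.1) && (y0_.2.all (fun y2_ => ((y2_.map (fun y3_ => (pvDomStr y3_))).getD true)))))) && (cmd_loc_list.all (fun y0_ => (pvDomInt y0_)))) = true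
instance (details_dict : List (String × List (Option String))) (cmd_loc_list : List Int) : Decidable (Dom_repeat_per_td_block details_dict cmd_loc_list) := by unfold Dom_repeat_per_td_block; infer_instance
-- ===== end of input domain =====

-- B rebuilds every parameter list in one pass from firing positions recorded by a
-- single fixed-length scan with a cumulative offset, instead of A's enumerate over a
-- list regrown while scanned with per-firing slice rewrites of all 32 lists (alternative
-- decomposition).  Both Pythons mutate their arguments in place; the equivalence proved
-- here is about the RETURNED values.

-- ===== SHARED HELPERS (lines identical in both Python sources) =====

-- the CMD_PARAMS OrderedDict (module constant), as its items list
def pvCmdParams : List (String × String) :=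
  [("command_list", "send"), ("sys_list", "sys"), ("session_list", "session"),
   ("startprompt_list", "start"), ("endprompt_list", "end"), ("verify_list", "verify"),
   ("verify_text_list", "search"), ("verify_context_list", "found"),
   ("timeout_list", "timeout"), ("sleeptime_list", "sleep"), ("retry_list", "retry"),
   ("retry_timer_list", "retry_timer"), ("retry_count_list", "retry_count"),
   ("retry_onmatch_list", "retry_onmatch"), ("resp_ref_list", "resp_ref"),
   ("resp_req_list", "resp_req"), ("resp_pat_req_list", "resp_pat_req"),
   ("resp_pat_key_list", "resp_pat_key"), ("resp_key_list", "resp_keys"),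
   ("inorder_resp_ref_list", "inorder_resp_ref"), ("log_list", "monitor"),
   ("verify_on_list", "verify_on"), ("inorder_search_list", "inorder"),
   ("vc_file_list", ""), ("verify_map_list", ""), ("operator_list", "operator"),
   ("cond_value_list", "cond_value"), ("cond_type_list", "cond_type"),
   ("sleeptime_before_match_list", "sleep_before_match"),
   ("return_on_fail_list", "return_on_fail"), ("logmsg_list", "log"),
   ("repeat_list", "repeat")]

-- isinstance(v, str) and v.lower().startswith('y')
def pvIsY (v : Option String) : Bool :=
  match v with
  | some s => PySem.Str.startswith (PySem.Str.lower s) "y"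
  | none => false

-- max(abs(val1 - val2) for (val1, val2) in zip(cmd_loc_list[1:], cmd_loc_list[:-1]))
-- (.getD 0 is never reached under Pre_: the list has ≥ 2 elements there)
def pvRepeatCount (cmd_loc_list : List Int) : Int :=
  ((List.zip (PySem.List.slice cmd_loc_list (some 1) none)
             (PySem.List.slice cmd_loc_list none (some (-1)))).map
    (fun p => |p.1 - p.2|) |> fun ds => ((PySem.List.max? ds (fun x => x)).getD 0))

-- ===== PORT A =====
-- A's for-loop over enumerate(repeat_list) while repeat_list (aliasing
-- details_dict['repeat_list']) is regrown in place: the alias is carried explicitly as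
-- `rl`, updated with exactly the slice assignment the dict entry receives in the fold.
-- `.getD` defaults stand where Python raises IndexError/KeyError; Pre_ excludes those inputs.
def pvLoopA (rc : Int) (rl : List (Option String))
    (dd : PySem.Dict String (List (Option String))) (cmd : List Int) (index : Nat) :
    PySem.Dict String (List (Option String)) × List Int :=
  if h : index < rl.length then
    if hfire : pvIsY rl[index] && cmd.contains ((index : Nat) : Int) then
      let cmdPos : Nat := ((PySem.List.index? cmd ((index : Nat) : Int)).getD 0) + 1
      let cmd' := cmd.take cmdPos ++ (cmd.drop cmdPos).map (fun v => v + rc - 1)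
      let dd' := pvCmdParams.foldl (fun acc kv =>
          let pl := acc.getD kv.1 []
          let e := if kv.1 == "repeat_list" then none else pl.getD index none
          acc.insert kv.1 (pl.take index ++ List.replicate rc.toNat e ++ pl.drop (index + 1))) dd
      pvLoopA rc
        (rl.take index ++ List.replicate rc.toNat (none : Option String) ++ rl.drop (index + 1))
        dd' cmd' (index + 1)
    else pvLoopA rc rl dd cmd (index + 1)
  else (dd, cmd)
  termination_by ((rl.drop index).countP (fun v => pvIsY v), rl.length - index)
  decreasing_by
  · apply Prod.Lex.left
    have hd : rl.drop index = rl[index] :: rl.drop (index + 1) := List.drop_eq_getElem_cons h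
    rw [Bool.and_eq_true] at hfire
    have hlen : (rl.take index).length = index := by simp; omega
    have hstep : (rl.take index ++ (List.replicate rc.toNat (none : Option String) ++
        rl.drop (index + 1))).drop (index + 1)
        = (List.replicate rc.toNat (none : Option String) ++ rl.drop (index + 1)).drop 1 := by
      have h0 : (rl.take index ++ (List.replicate rc.toNat (none : Option String) ++
          rl.drop (index + 1))).drop ((rl.take index).length + 1)
          = (List.replicate rc.toNat (none : Option String) ++ rl.drop (index + 1)).drop 1 :=
        List.drop_length_add_append 1
      rw [hlen] at h0
      exact h0
    have h1 : ((rl.take index ++ (List.replicate rc.toNat (none : Option String) ++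
        rl.drop (index + 1))).drop (index + 1)).countP (fun v => pvIsY v)
        ≤ (rl.drop (index + 1)).countP (fun v => pvIsY v) := by
      rw [hstep]
      have h2 : ((List.replicate rc.toNat (none : Option String) ++
          rl.drop (index + 1)).drop 1).countP (fun v => pvIsY v)
          ≤ (List.replicate rc.toNat (none : Option String) ++
            rl.drop (index + 1)).countP (fun v => pvIsY v) := by
        conv_rhs => rw [← List.take_append_drop 1
          (List.replicate rc.toNat (none : Option String) ++ rl.drop (index + 1))]
        rw [List.countP_append]; omega
      have h3 : (List.replicate rc.toNat (none : Option String) ++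
          rl.drop (index + 1)).countP (fun v => pvIsY v)
          = (rl.drop (index + 1)).countP (fun v => pvIsY v) := by
        rw [List.countP_append, List.countP_replicate]
        simp [pvIsY]
      omega
    rw [hd, List.countP_cons]
    simp [hfire.1]
    omega
  · have hd : rl.drop index = rl[index] :: rl.drop (index + 1) := List.drop_eq_getElem_cons h
    by_cases hy : pvIsY rl[index] = true
    · apply Prod.Lex.left
      rw [hd, List.countP_cons]; simp [hy]
    · apply Prod.Lex.right'
      · rw [hd, List.countP_cons]; simp [hy]
      · omega

def repeat_per_td_block (details_dict : List (String × List (Option String)))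
    (cmd_loc_list : List Int) : (List (String × List (Option String))) × List Int :=
  let repeat_count := pvRepeatCount cmd_loc_list
  let dd := PySem.Dict.mk details_dict
  let repeat_list := (dd.get? "repeat_list").getD []
  let r := pvLoopA repeat_count repeat_list dd cmd_loc_list 0
  (r.1.items, r.2)

-- ===== PORT B =====
-- single scan of the ORIGINAL repeat_list with a cumulative offset, recording firing positions
def pvScanB (rc : Int) (rl : List (Option String)) (cmd : List Int) (offset : Int)
    (i : Nat) (positions : List Int) : List Int × List Int :=
  if h : i < rl.length then
    if hfire : pvIsY rl[i] && cmd.contains ((i : Nat) + offset) then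
      let p : Nat := ((PySem.List.index? cmd ((i : Nat) + offset)).getD 0) + 1
      let cmd' := cmd.take p ++ (cmd.drop p).map (fun v => v + rc - 1)
      pvScanB rc rl cmd' (offset + rc - 1) (i + 1) (positions ++ [((i : Nat) : Int)])
    else pvScanB rc rl cmd offset (i + 1) positions
  else (positions, cmd)
  termination_by rl.length - i

-- one rebuild pass: for p, element in enumerate(plist): extend/append
def pvRebuild (rc : Nat) (isRep : Bool) (pset : PySem.Set Int)
    (pl : List (Option String)) : List (Option String) :=
  (PySem.List.enumerate pl).foldl (fun out pe =>
    if pset.contains pe.1 then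
      out ++ List.replicate rc (if isRep then none else pe.2)
    else out ++ [pe.2]) []

def repeat_per_td_block_alt (details_dict : List (String × List (Option String)))
    (cmd_loc_list : List Int) : (List (String × List (Option String))) × List Int :=
  let repeat_count := pvRepeatCount cmd_loc_list
  let dd := PySem.Dict.mk details_dict
  let repeat_list := (dd.get? "repeat_list").getD []
  let r := pvScanB repeat_count repeat_list cmd_loc_list 0 0 []
  if r.1.isEmpty then (dd.items, r.2)
  else
    let pset := PySem.Set.ofList r.1
    let dd' := pvCmdParams.foldl (fun acc kv =>
        acc.insert kv.1
          (pvRebuild repeat_count.toNat (kv.1 == "repeat_list") pset (acc.getD kv.1 []))) dd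
    (dd'.items, r.2)

-- ===== PRECONDITION & SPEC =====
-- Pre_ excludes (i) cmd_loc_list shorter than 2 (A's max(...) raises ValueError),
-- (ii) cmd_loc_list whose entries are all equal, i.e. repeat count 0: expanding a block
-- zero times is not meaningful for this function and the resulting deletions of A and B
-- are both unspecified corner behaviour, (iii) dicts without a 'repeat_list' key (A raises
-- KeyError), (iv) association lists with duplicate keys, which a Python dict cannot
-- represent, and (v) when some repeat entry can fire, dicts in which any CMD_PARAMS list is
-- missing or shorter than repeat_list: a missing key or a fired index past a list's end
-- makes A raise KeyError/IndexError, and this closed-form bound conservatively also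
-- excludes some short-list inputs on which A returns.
def Pre_repeat_per_td_block (details_dict : List (String × List (Option String)))
    (cmd_loc_list : List Int) : Prop :=
  2 ≤ cmd_loc_list.length ∧
  (∃ p ∈ cmd_loc_list.zip cmd_loc_list.tail, p.1 ≠ p.2) ∧
  (details_dict.map Prod.fst).Nodup ∧
  ((PySem.Dict.mk details_dict).get? "repeat_list").isSome ∧
  ((∃ i : Fin (((PySem.Dict.mk details_dict).get? "repeat_list").getD []).length,
      pvIsY ((((PySem.Dict.mk details_dict).get? "repeat_list").getD [])[(i : Nat)]'i.isLt) = true ∧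
      (((i : Nat) : Int) ∈ cmd_loc_list)) →
    ∀ kv ∈ pvCmdParams, ∃ pl, (PySem.Dict.mk details_dict).get? kv.1 = some pl ∧
      (((PySem.Dict.mk details_dict).get? "repeat_list").getD []).length ≤ pl.length)

instance (details_dict : List (String × List (Option String))) (cmd_loc_list : List Int) :
    Decidable (Pre_repeat_per_td_block details_dict cmd_loc_list) := by
  unfold Pre_repeat_per_td_block; infer_instance

def pvWitness_repeat_per_td_block : (List (String × List (Option String))) × List Int :=
  ([("repeat_list", [some "n", none])], [0, 1])

def Spec_repeat_per_td_block (details_dict : List (String × List (Option String)))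
    (cmd_loc_list : List Int) (out : (List (String × List (Option String))) × List Int) : Prop :=
  out = repeat_per_td_block_alt details_dict cmd_loc_list

instance (details_dict : List (String × List (Option String))) (cmd_loc_list : List Int)
    (out : (List (String × List (Option String))) × List Int) :
    Decidable (Spec_repeat_per_td_block details_dict cmd_loc_list out) := by
  unfold Spec_repeat_per_td_block; infer_instance

-- ===== CLAIM (what is proved, stated in full; the proofs are below) =====
def Claim_equal_repeat_per_td_block : Prop := ∀ (details_dict : List (String × List (Option String))) (cmd_loc_list : List Int), Dom_repeat_per_td_block details_dict cmd_loc_list → Pre_repeat_per_td_block details_dict cmd_loc_list → Spec_repeat_per_td_block details_dict cmd_loc_list (repeat_per_td_block details_dict cmd_loc_list)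

-- ===== LEMMAS AND PROOFS =====

-- ---- proof-side helpers ----

-- one-pass rebuild as structural recursion over the list with an explicit position counter
def pvRbAux (rc : Nat) (isRep : Bool) (mem : Nat → Bool) (j : Nat) :
    List (Option String) → List (Option String)
  | [] => []
  | e :: t =>
      (if mem j then List.replicate rc (if isRep then none else e) else [e]) ++
        pvRbAux rc isRep mem (j + 1) t

-- membership test of the recorded-positions list, as a predicate on scan positions
def pvMemS (S : List Int) : Nat → Bool := fun j => S.contains ((j : Nat) : Int)

-- the state of one parameter list after the firings recorded in S, all at positions < i:
-- rebuilt prefix of the first i original elements, untouched suffix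
def pvPfx (rc : Nat) (isRep : Bool) (S : List Int) (i : Nat) (v : List (Option String)) :
    List (Option String) :=
  pvRbAux rc isRep (pvMemS S) 0 (v.take i) ++ v.drop i

def pvKeysOK (dd0 : PySem.Dict String (List (Option String))) (n : Nat) : Prop :=
  ∀ kv ∈ pvCmdParams, ∃ pl, dd0.get? kv.1 = some pl ∧ n ≤ pl.length

-- B's phase 2 as a function of the recorded positions (mirrors the tail of the alt port)
def pvFinal (rc : Int) (dd0 : PySem.Dict String (List (Option String))) (P : List Int) :
    PySem.Dict String (List (Option String)) :=
  if P.isEmpty then dd0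
  else pvCmdParams.foldl (fun acc kv =>
      acc.insert kv.1
        (pvRebuild rc.toNat (kv.1 == "repeat_list") (PySem.Set.ofList P) (acc.getD kv.1 []))) dd0

-- ---- pvRbAux facts ----

theorem pvRbAux_append (rc : Nat) (b : Bool) (mem : Nat → Bool) (l1 l2 : List (Option String)) :
    ∀ j, pvRbAux rc b mem j (l1 ++ l2)
      = pvRbAux rc b mem j l1 ++ pvRbAux rc b mem (j + l1.length) l2 := by
  induction l1 with
  | nil => intro j; simp [pvRbAux]
  | cons e t ih =>
      intro j
      simp only [List.cons_append, pvRbAux, ih (j + 1), List.length_cons, List.append_assoc]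
      ring_nf

theorem pvRbAux_congr (rc : Nat) (b : Bool) (mem mem' : Nat → Bool) (l : List (Option String)) :
    ∀ j, (∀ x, j ≤ x → x < j + l.length → mem x = mem' x) →
      pvRbAux rc b mem j l = pvRbAux rc b mem' j l := by
  induction l with
  | nil => intro j _; rfl
  | cons e t ih =>
      intro j hj
      simp only [pvRbAux]
      rw [hj j (by omega) (by simp), ih (j + 1) (fun x h1 h2 => hj x (by omega) (by simp at h2 ⊢; omega))]

theorem pvRbAux_id (rc : Nat) (b : Bool) (mem : Nat → Bool) (l : List (Option String)) :
    ∀ j, (∀ x, j ≤ x → x < j + l.length → mem x = false) →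
      pvRbAux rc b mem j l = l := by
  induction l with
  | nil => intro j _; rfl
  | cons e t ih =>
      intro j hj
      simp only [pvRbAux]
      rw [hj j (by omega) (by simp), ih (j + 1) (fun x h1 h2 => hj x (by omega) (by simp at h2 ⊢; omega))]
      simp

theorem pvRbAux_length_congr (rc : Nat) (b b' : Bool) (mem : Nat → Bool)
    (l l' : List (Option String)) :
    ∀ j, l.length = l'.length →
      (pvRbAux rc b mem j l).length = (pvRbAux rc b' mem j l').length := by
  induction l generalizing l' with
  | nil =>
      intro j h
      have h' : l' = [] := List.length_eq_zero_iff.mp (by simpa using h.symm)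
      subst h'; rfl
  | cons e t ih =>
      intro j h
      match l' with
      | [] => simp at h
      | e' :: t' =>
          simp only [pvRbAux, List.length_append, List.length_cons] at h ⊢
          rw [ih t' (j + 1) (by omega)]
          by_cases hm : mem j <;> simp [hm]

-- B's fold-over-enumerate rebuild IS pvRbAux
theorem pvRebuild_eq_rbAux (rc : Nat) (b : Bool) (pset : PySem.Set Int)
    (pl : List (Option String)) :
    pvRebuild rc b pset pl = pvRbAux rc b (fun j => pset.contains ((j : Nat) : Int)) 0 pl := by
  unfold pvRebuild
  suffices h : ∀ (pl : List (Option String)) (s : Nat) (acc : List (Option String)),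
      (PySem.List.enumerate pl ((s : Nat) : Int)).foldl (fun out pe =>
        if pset.contains pe.1 then out ++ List.replicate rc (if b then none else pe.2)
        else out ++ [pe.2]) acc
      = acc ++ pvRbAux rc b (fun j => pset.contains ((j : Nat) : Int)) s pl by
    have := h pl 0 []
    simpa using this
  intro pl
  induction pl with
  | nil => intro s acc; simp [PySem.List.enumerate, pvRbAux]
  | cons e t ih =>
      intro s acc
      rw [PySem.List.enumerate_cons, List.foldl_cons]
      have hcast : ((s : Nat) : Int) + 1 = (((s + 1 : Nat)) : Int) := by push_cast; ring
      rw [hcast, ih (s + 1)]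
      simp only [pvRbAux]
      by_cases hm : ((s : Nat) : Int) ∈ pset <;> simp [hm, List.append_assoc]

theorem pvMemS_append_lt (S : List Int) (i x : Nat) (hx : x < i) :
    pvMemS (S ++ [((i : Nat) : Int)]) x = pvMemS S x := by
  unfold pvMemS
  simp only [List.contains_append]
  have : ([((i : Nat) : Int)].contains ((x : Nat) : Int)) = false := by
    simp; omega
  rw [this, Bool.or_false]

theorem pvMemS_nil (x : Nat) : pvMemS [] x = false := by
  rfl

theorem pvMemS_of_lt_all (S : List Int) (i x : Nat) (hx : i ≤ x)
    (hS : ∀ y ∈ S, ∃ j : Nat, y = (j : Int) ∧ j < i) :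
    pvMemS S x = false := by
  unfold pvMemS
  have h1 : ¬ (((x : Nat) : Int) ∈ S) := by
    intro hmem
    obtain ⟨j, hj1, hj2⟩ := hS _ hmem
    omega
  simpa using h1

-- ---- prefix-evolution equations ----

-- (v.drop i).take 1 ++ v.drop (i+1) = v.drop i
theorem pvDropSplit (v : List (Option String)) (i : Nat) :
    (v.drop i).take 1 ++ v.drop (i + 1) = v.drop i := by
  rw [← List.drop_drop]
  exact List.take_append_drop 1 (v.drop i)

-- a non-member scan position extends the rebuilt prefix by the (possibly absent) element
theorem pvPE0 (rc : Nat) (b : Bool) (S : List Int) (j : Nat) (v : List (Option String))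
    (hj : pvMemS S j = false) :
    pvRbAux rc b (pvMemS S) 0 (v.take (j + 1))
      = pvRbAux rc b (pvMemS S) 0 (v.take j) ++ (v.drop j).take 1 := by
  by_cases hlt : j < v.length
  · have htake : v.take (j + 1) = v.take j ++ [v[j]] := by
      rw [List.take_add_one]; simp [List.getElem?_eq_getElem hlt]
    have hdrop : (v.drop j).take 1 = [v[j]] := by
      rw [List.drop_eq_getElem_cons hlt]; rfl
    rw [htake, pvRbAux_append, hdrop]
    have hlen : (v.take j).length = j := by simp; omega
    simp only [pvRbAux, hlen, Nat.zero_add, hj]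
    simp
  · have htake : v.take (j + 1) = v.take j := by
      rw [List.take_of_length_le (by omega), List.take_of_length_le (by omega)]
    have hdrop : (v.drop j).take 1 = [] := by
      rw [List.drop_eq_nil_of_le (by omega)]; rfl
    rw [htake, hdrop, List.append_nil]

-- recording position i (< v.length) appends the replicated block to the rebuilt prefix
theorem pvPE1 (rc : Nat) (b : Bool) (S : List Int) (i : Nat) (v : List (Option String))
    (hi : i < v.length) (_hS : ∀ y ∈ S, ∃ j : Nat, y = (j : Int) ∧ j < i) :
    pvRbAux rc b (pvMemS (S ++ [((i : Nat) : Int)])) 0 (v.take (i + 1))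
      = pvRbAux rc b (pvMemS S) 0 (v.take i)
        ++ List.replicate rc (if b then none else v[i]) := by
  have htake : v.take (i + 1) = v.take i ++ [v[i]] := by
    rw [List.take_add_one]; simp [List.getElem?_eq_getElem hi]
  rw [htake, pvRbAux_append]
  have hlen : (v.take i).length = i := by simp; omega
  have hcongr : pvRbAux rc b (pvMemS (S ++ [((i : Nat) : Int)])) 0 (v.take i)
      = pvRbAux rc b (pvMemS S) 0 (v.take i) := by
    apply pvRbAux_congr
    intro x hx1 hx2
    exact pvMemS_append_lt S i x (by omega)
  have hmem : pvMemS (S ++ [((i : Nat) : Int)]) i = true := by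
    unfold pvMemS; simp
  simp only [hcongr, hlen, Nat.zero_add, pvRbAux, hmem]
  simp

-- nothing recorded yet: the "rebuilt" list is the original
theorem pvPfx_nil (rc : Nat) (b : Bool) (i : Nat) (v : List (Option String)) :
    pvPfx rc b [] i v = v := by
  unfold pvPfx
  rw [pvRbAux_id _ _ _ _ _ (fun x _ _ => pvMemS_nil x)]
  exact List.take_append_drop i v

-- a non-fired step keeps the rebuilt list unchanged
theorem pvPfx_step (rc : Nat) (b : Bool) (S : List Int) (i : Nat) (v : List (Option String))
    (hS : ∀ y ∈ S, ∃ j : Nat, y = (j : Int) ∧ j < i) :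
    pvPfx rc b S (i + 1) v = pvPfx rc b S i v := by
  unfold pvPfx
  rw [pvPE0 rc b S i v (pvMemS_of_lt_all S i i (le_refl i) hS), List.append_assoc, pvDropSplit]

-- all members below i: the one-pass rebuild of the whole list splits at i
theorem pvPfx_eq_rbAux_all (rc : Nat) (b : Bool) (S : List Int) (i : Nat)
    (v : List (Option String))
    (hS : ∀ y ∈ S, ∃ j : Nat, y = (j : Int) ∧ j < i) :
    pvRbAux rc b (pvMemS S) 0 v = pvPfx rc b S i v := by
  unfold pvPfx
  conv_lhs => rw [← List.take_append_drop i v]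
  rw [pvRbAux_append]
  congr 1
  apply pvRbAux_id
  intro x hx1 hx2
  have h1 : (v.take i).length = min i v.length := by simp
  have h2 : (v.drop i).length = v.length - i := by simp
  exact pvMemS_of_lt_all S i x (by omega) hS

theorem pvPfx_take (rc : Nat) (b : Bool) (S : List Int) (i : Nat) (v : List (Option String))
    (idx : Nat) (hidx : idx = (pvRbAux rc b (pvMemS S) 0 (v.take i)).length) :
    (pvPfx rc b S i v).take idx = pvRbAux rc b (pvMemS S) 0 (v.take i) := by
  unfold pvPfx
  rw [hidx, List.take_left]

theorem pvPfx_drop (rc : Nat) (b : Bool) (S : List Int) (i : Nat) (v : List (Option String))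
    (idx : Nat) (hidx : idx = (pvRbAux rc b (pvMemS S) 0 (v.take i)).length) :
    (pvPfx rc b S i v).drop (idx + 1) = v.drop (i + 1) := by
  unfold pvPfx
  subst hidx
  have h0 := List.drop_length_add_append (l₁ := pvRbAux rc b (pvMemS S) 0 (v.take i)) (l₂ := v.drop i) 1
  rw [h0, List.drop_drop]

theorem pvPfx_getD (rc : Nat) (b : Bool) (S : List Int) (i : Nat) (v : List (Option String))
    (hi : i < v.length)
    (idx : Nat) (hidx : idx = (pvRbAux rc b (pvMemS S) 0 (v.take i)).length) :
    (pvPfx rc b S i v).getD idx none = v[i] := by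
  unfold pvPfx
  subst hidx
  rw [List.getD, List.getElem?_append_right (le_refl _)]
  simp [List.getElem?_drop, List.getElem?_eq_getElem hi]

theorem pvPfx_length (rc : Nat) (b : Bool) (S : List Int) (i : Nat) (v : List (Option String))
    (idx : Nat) (hidx : idx = (pvRbAux rc b (pvMemS S) 0 (v.take i)).length) :
    (pvPfx rc b S i v).length = idx + (v.length - i) := by
  unfold pvPfx
  subst hidx
  simp

-- CORE: A's slice assignment on the current list = the rebuilt state at the next scan position
theorem pvPfx_fire (rc : Nat) (b : Bool) (S : List Int) (i : Nat)
    (v : List (Option String))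
    (hi : i < v.length) (hS : ∀ y ∈ S, ∃ j : Nat, y = (j : Int) ∧ j < i)
    (idx : Nat) (hidx : idx = (pvRbAux rc b (pvMemS S) 0 (v.take i)).length) :
    (pvPfx rc b S i v).take idx
        ++ List.replicate rc (if b then none else (pvPfx rc b S i v).getD idx none)
        ++ (pvPfx rc b S i v).drop (idx + 1)
      = pvPfx rc b (S ++ [((i : Nat) : Int)]) (i + 1) v := by
  have hget := pvPfx_getD rc b S i v hi idx hidx
  rw [hget, pvPfx_take rc b S i v idx hidx, pvPfx_drop rc b S i v idx hidx]
  unfold pvPfx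
  rw [pvPE1 rc b S i v hi hS, List.append_assoc]

-- ---- dict fold fact ----

-- a fold inserting g-transformed values at distinct present keys rewrites exactly those entries
theorem pvFoldInsert (g : String → List (Option String) → List (Option String)) :
    ∀ (ks : List (String × String)) (dd : PySem.Dict String (List (Option String))),
      (∀ kv ∈ ks, dd.contains kv.1 = true) → (ks.map Prod.fst).Nodup →
      (ks.foldl (fun acc kv => acc.insert kv.1 (g kv.1 (acc.getD kv.1 []))) dd).keys = dd.keys ∧
      ∀ k', (ks.foldl (fun acc kv => acc.insert kv.1 (g kv.1 (acc.getD kv.1 []))) dd).get? k'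
        = if (ks.map Prod.fst).contains k' then (dd.get? k').map (g k') else dd.get? k' := by
  intro ks
  induction ks with
  | nil => intro dd _ _; exact ⟨rfl, fun k' => by simp⟩
  | cons kv rest ih =>
      intro dd hcont hnd
      simp only [List.map_cons, List.nodup_cons] at hnd
      have hc : dd.contains kv.1 = true := hcont kv (List.mem_cons_self)
      obtain ⟨v, hv⟩ : ∃ v, dd.get? kv.1 = some v := by
        have := PySem.Dict.contains_eq_isSome_get? (d := dd) (k := kv.1)
        rw [hc] at this
        exact Option.isSome_iff_exists.mp this.symm
      set dd1 := dd.insert kv.1 (g kv.1 (dd.getD kv.1 [])) with hdd1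
      have hcont1 : ∀ kv' ∈ rest, dd1.contains kv'.1 = true := by
        intro kv' hkv'
        rw [hdd1, PySem.Dict.contains_insert]
        simp [hcont kv' (List.mem_cons_of_mem _ hkv')]
      obtain ⟨ihk, ihg⟩ := ih dd1 hcont1 hnd.2
      have hkeys1 : dd1.keys = dd.keys := PySem.Dict.keys_insert_of_contains dd _ hc
      refine ⟨by simp only [List.foldl_cons]; rw [ihk, hkeys1], fun k' => ?_⟩
      simp only [List.foldl_cons]
      rw [ihg k', hdd1, PySem.Dict.get?_insert]
      simp only [List.map_cons, List.contains_cons]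
      by_cases heq : k' = kv.1
      · subst heq
        simp [hnd.1, hv, PySem.Dict.getD_of_get?_eq_some dd [] hv]
      · by_cases hmem : k' ∈ rest.map Prod.fst
        · simp [heq, hmem]
        · simp [heq, hmem]

theorem pvLoopA_skip (rc : Int) (dd : PySem.Dict String (List (Option String)))
    (cmd : List Int) :
    ∀ (m : Nat) (rl : List (Option String)) (idx : Nat),
      (rl.drop idx).take m = List.replicate m (none : Option String) →
      pvLoopA rc rl dd cmd idx = pvLoopA rc rl dd cmd (idx + m) := by
  intro m
  induction m with
  | zero => intro rl idx _; rfl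
  | succ m ih =>
      intro rl idx hblock
      by_cases h : idx < rl.length
      · have hdrop : rl.drop idx = rl[idx] :: rl.drop (idx + 1) := List.drop_eq_getElem_cons h
        rw [hdrop] at hblock
        simp only [List.take_succ_cons, List.replicate_succ, List.cons.injEq] at hblock
        have hnone : rl[idx] = none := hblock.1
        rw [pvLoopA]
        rw [dif_pos h]
        have hfalse : (pvIsY rl[idx] && cmd.contains ((idx : Nat) : Int)) = false := by
          rw [hnone]; simp [pvIsY]
        rw [dif_neg (show ¬ ((pvIsY rl[idx] && cmd.contains ((idx : Nat) : Int)) = true) by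
          rw [hfalse]; simp)]
        rw [ih (rl) (idx + 1) hblock.2]
        congr 1
        omega
      · have hnil : rl.drop idx = [] := List.drop_eq_nil_of_le (by omega)
        rw [hnil] at hblock
        simp at hblock

-- under Pre_ (length ≥ 2 and two distinct consecutive entries) the repeat count is ≥ 1
theorem pvRepeatCount_pos (cmd : List Int) (h : 2 ≤ cmd.length)
    (hne : ∃ p ∈ cmd.zip cmd.tail, p.1 ≠ p.2) : 1 ≤ pvRepeatCount cmd := by
  unfold pvRepeatCount
  simp only
  have h1 : PySem.List.slice cmd (some 1) none = cmd.drop 1 := by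
    have := PySem.List.slice_from (xs := cmd) (a := 1) (by norm_num)
    simpa using this
  have h2 : PySem.List.slice cmd none (some (-1)) = cmd.dropLast :=
    PySem.List.slice_to_neg_one cmd
  obtain ⟨p, hp, hpne⟩ := hne
  obtain ⟨k, hk, hkeq⟩ := List.getElem_of_mem hp
  have hklen : k < cmd.length - 1 := by
    have := hk
    simp [List.length_zip, List.length_tail] at this
    omega
  have hp1 : p.1 = cmd[k]'(by omega) := by
    rw [← hkeq]; simp
  have hp2 : p.2 = cmd[k + 1]'(by omega) := by
    rw [← hkeq]
    simp [List.getElem_tail]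
  set ds := (List.zip (PySem.List.slice cmd (some 1) none)
      (PySem.List.slice cmd none (some (-1)))).map (fun p => |p.1 - p.2|) with hds
  have hmem : |cmd[k + 1]'(by omega) - cmd[k]'(by omega)| ∈ ds := by
    rw [hds, h1, h2]
    apply List.mem_map.mpr
    refine ⟨(cmd[k + 1]'(by omega), cmd[k]'(by omega)), ?_, rfl⟩
    apply List.mem_iff_getElem.mpr
    refine ⟨k, by simp [List.length_zip, List.length_dropLast]; omega, ?_⟩
    simp [List.getElem_zip, List.getElem_dropLast]
  cases hmax : PySem.List.max? ds (fun x => x) with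
  | none =>
      have : ds = [] := (PySem.List.max?_eq_none_iff _ _).mp hmax
      rw [this] at hmem
      exact absurd hmem (List.not_mem_nil)
  | some m =>
      have hle := PySem.List.max?_isMax hmax _ hmem
      simp only [Option.getD_some]
      have habs : 1 ≤ |cmd[k + 1]'(by omega) - cmd[k]'(by omega)| := by
        refine Int.one_le_abs ?_
        rw [hp1, hp2] at hpne
        omega
      exact le_trans habs hle

-- B's set-based rebuild of a whole list = the rebuilt state, when all members are < i
theorem pvRebuild_eq_pfx (rc : Nat) (b : Bool) (S : List Int) (i : Nat)
    (v : List (Option String)) (hS : ∀ y ∈ S, ∃ j : Nat, y = (j : Int) ∧ j < i) :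
    pvRebuild rc b (PySem.Set.ofList S) v = pvPfx rc b S i v := by
  rw [pvRebuild_eq_rbAux]
  have hmemeq : (fun j : Nat => (PySem.Set.ofList S).contains ((j : Nat) : Int)) = pvMemS S := by
    funext j
    unfold pvMemS
    by_cases hj : ((j : Nat) : Int) ∈ S
    · have e1 : S.contains ((j : Nat) : Int) = true := List.contains_iff_mem.mpr hj
      have e2 : (PySem.Set.ofList S).contains ((j : Nat) : Int) = true :=
        List.contains_iff_mem.mpr ((PySem.Set.mem_ofList S _).mpr hj)
      rw [e1, e2]
    · have h1 : ¬ ((j : Nat) : Int) ∈ PySem.Set.ofList S :=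
        fun hc => hj ((PySem.Set.mem_ofList S _).mp hc)
      have e1 : S.contains ((j : Nat) : Int) = false := by
        rw [Bool.eq_false_iff]; intro hc; exact hj (List.contains_iff_mem.mp hc)
      have e2 : (PySem.Set.ofList S).contains ((j : Nat) : Int) = false := by
        rw [Bool.eq_false_iff]; intro hc; exact h1 (List.contains_iff_mem.mp hc)
      rw [e1, e2]
  rw [hmemeq]
  exact pvPfx_eq_rbAux_all rc b S i v hS

-- the elements A walks over right after a firing are the freshly inserted `none`s
theorem pvBlock (k idx : Nat) (P X : List (Option String)) (hP : P.length = idx) :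
    ((P ++ (List.replicate k (none : Option String) ++ X)).drop (idx + 1)).take (k - 1)
      = List.replicate (k - 1) (none : Option String) := by
  have h0 : (P ++ (List.replicate k (none : Option String) ++ X)).drop (P.length + 1)
      = (List.replicate k (none : Option String) ++ X).drop 1 :=
    List.drop_length_add_append 1
  rw [hP] at h0
  rw [h0]
  cases k with
  | zero => simp
  | succ m =>
      rw [List.replicate_succ, List.cons_append, List.drop_one, List.tail_cons]
      simp only [Nat.add_sub_cancel]
      rw [List.take_left' (by simp)]

-- ---- the bisimulation ----

set_option maxHeartbeats 2000000 in
theorem pvLoopSim (rc : Int) (hrc : 1 ≤ rc)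
    (dd0 : PySem.Dict String (List (Option String))) (rl0 : List (Option String))
    (cmd0 : List Int)
    (hnd0 : dd0.keys.Nodup)
    (HF : (∃ i : Fin rl0.length, pvIsY rl0[(i : Nat)] = true ∧ (((i : Nat) : Int) ∈ cmd0)) →
      pvKeysOK dd0 rl0.length)
    (i : Nat) (offset : Int) (cmd S : List Int) (idx : Nat)
    (dd : PySem.Dict String (List (Option String))) (rlA : List (Option String))
    (I1 : (idx : Int) = (i : Int) + offset)
    (I2 : rlA = pvPfx rc.toNat true S i rl0)
    (I3 : (i ≤ rl0.length ∧ idx = (pvRbAux rc.toNat true (pvMemS S) 0 (rl0.take i)).length)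
        ∨ (rl0.length ≤ i ∧ rlA.length ≤ idx))
    (I4 : S = [] → cmd = cmd0 ∧ offset = 0 ∧ dd = dd0)
    (I5 : dd.keys = dd0.keys)
    (I6 : S ≠ [] → pvKeysOK dd0 rl0.length ∧ ∀ k', dd.get? k'
        = (dd0.get? k').map (fun v =>
            if (pvCmdParams.map Prod.fst).contains k'
            then pvPfx rc.toNat (k' == "repeat_list") S i v else v))
    (I7 : ∀ y ∈ S, ∃ j : Nat, y = (j : Int) ∧ j < i) :
    (pvLoopA rc rlA dd cmd idx).1.items
        = (pvFinal rc dd0 (pvScanB rc rl0 cmd offset i S).1).items ∧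
      (pvLoopA rc rlA dd cmd idx).2 = (pvScanB rc rl0 cmd offset i S).2 := by
  by_cases hin : i < rl0.length
  · -- step case
    have hI3 : i ≤ rl0.length ∧ idx = (pvRbAux rc.toNat true (pvMemS S) 0 (rl0.take i)).length := by
      rcases I3 with h | ⟨hle, _⟩
      · exact h
      · omega
    obtain ⟨hiLe, hidx⟩ := hI3
    have hlenA := pvPfx_length rc.toNat true S i rl0 idx hidx
    rw [← I2] at hlenA
    have hA : idx < rlA.length := by omega
    have hElem : rlA[idx]'hA = rl0[i]'hin := by
      have h1 : rlA[idx]? = some (rl0[i]'hin) := by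
        rw [I2]
        unfold pvPfx
        rw [List.getElem?_append_right (by omega)]
        rw [(by omega : idx - (pvRbAux rc.toNat true (pvMemS S) 0 (rl0.take i)).length = 0)]
        rw [List.getElem?_drop]
        simp [List.getElem?_eq_getElem hin]
      have h2 : rlA[idx]? = some (rlA[idx]'hA) := List.getElem?_eq_getElem hA
      rw [h1] at h2
      exact (Option.some.inj h2).symm
    rw [pvLoopA, dif_pos hA, pvScanB, dif_pos hin]
    have hcondeq : (pvIsY (rlA[idx]'hA) && cmd.contains ((idx : Nat) : Int))
        = (pvIsY (rl0[i]'hin) && cmd.contains (((i : Nat) : Int) + offset)) := by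
      rw [hElem, I1]
    rw [hcondeq]
    by_cases hfire : (pvIsY (rl0[i]'hin) && cmd.contains (((i : Nat) : Int) + offset)) = true
    · rw [dif_pos hfire, dif_pos hfire]
      show (pvLoopA rc (rlA.take idx ++ List.replicate rc.toNat none ++ rlA.drop (idx + 1))
          (pvCmdParams.foldl (fun acc kv => acc.insert kv.1
            ((acc.getD kv.1 []).take idx ++ List.replicate rc.toNat
              (if kv.1 == "repeat_list" then none else (acc.getD kv.1 []).getD idx none)
              ++ (acc.getD kv.1 []).drop (idx + 1))) dd)
          (cmd.take (((PySem.List.index? cmd ((idx : Nat) : Int)).getD 0) + 1)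
            ++ (cmd.drop (((PySem.List.index? cmd ((idx : Nat) : Int)).getD 0) + 1)).map
              (fun v => v + rc - 1)) (idx + 1)).1.items
        = (pvFinal rc dd0 (pvScanB rc rl0
            (cmd.take (((PySem.List.index? cmd (((i : Nat) : Int) + offset)).getD 0) + 1)
              ++ (cmd.drop (((PySem.List.index? cmd (((i : Nat) : Int) + offset)).getD 0) + 1)).map
                (fun v => v + rc - 1))
            (offset + rc - 1) (i + 1)
            (S ++ [((i : Nat) : Int)])).1).items
        ∧ _
      rw [I1]
      have hk : ((rc.toNat : Nat) : Int) = rc := Int.toNat_of_nonneg (by omega)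
      obtain ⟨hy, hcm⟩ : pvIsY (rl0[i]'hin) = true ∧ cmd.contains (((i : Nat) : Int) + offset) = true := by
        rw [← Bool.and_eq_true]; exact hfire
      have hOK : pvKeysOK dd0 rl0.length := by
        by_cases hS : S = []
        · obtain ⟨hcmd, hoff, -⟩ := I4 hS
          apply HF
          refine ⟨⟨i, hin⟩, hy, ?_⟩
          rw [hcmd, hoff, add_zero] at hcm
          exact List.contains_iff_mem.mp hcm
        · exact (I6 hS).1
      have hOLD : ∀ k', dd.get? k' = (dd0.get? k').map (fun v =>
          if (pvCmdParams.map Prod.fst).contains k'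
          then pvPfx rc.toNat (k' == "repeat_list") S i v else v) := by
        by_cases hS : S = []
        · intro k'
          obtain ⟨-, -, hdd⟩ := I4 hS
          subst hS
          rw [hdd]
          have hId : (fun v : List (Option String) =>
              if (pvCmdParams.map Prod.fst).contains k'
              then pvPfx rc.toNat (k' == "repeat_list") ([] : List Int) i v else v) = id := by
            funext v
            rw [pvPfx_nil]
            split <;> rfl
          rw [hId, Option.map_id, id]
        · exact (I6 hS).2
      have hndks : (pvCmdParams.map Prod.fst).Nodup := by decide
      have hcontA : ∀ kv ∈ pvCmdParams, dd.contains kv.1 = true := by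
        intro kv hkv
        obtain ⟨pl, hpl, -⟩ := hOK kv hkv
        rw [PySem.Dict.contains_eq_isSome_get?, hOLD kv.1, hpl]
        rfl
      obtain ⟨hkeysA, hgetA⟩ := pvFoldInsert
        (fun k'' v => v.take idx ++ List.replicate rc.toNat
          (if k'' == "repeat_list" then none else v.getD idx none) ++ v.drop (idx + 1))
        pvCmdParams dd hcontA hndks
      have hfirelem := pvPfx_fire rc.toNat true S i rl0 hin I7 idx hidx
      have hrlA' : rlA.take idx ++ List.replicate rc.toNat none ++ rlA.drop (idx + 1)
          = pvPfx rc.toNat true (S ++ [((i : Nat) : Int)]) (i + 1) rl0 := by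
        rw [I2]
        simpa using hfirelem
      have hblock : ((pvPfx rc.toNat true (S ++ [((i : Nat) : Int)]) (i + 1) rl0).drop
            (idx + 1)).take (rc.toNat - 1)
          = List.replicate (rc.toNat - 1) (none : Option String) := by
        rw [← hrlA', I2, pvPfx_take rc.toNat true S i rl0 idx hidx,
          pvPfx_drop rc.toNat true S i rl0 idx hidx, List.append_assoc]
        exact pvBlock rc.toNat idx _ _ (by rw [hidx])
      rw [hrlA', pvLoopA_skip rc _ _ (rc.toNat - 1) _ (idx + 1) hblock]
      -- invariants for the recursive call
      have hS'lt : ∀ y ∈ S ++ [((i : Nat) : Int)], ∃ j : Nat, y = (j : Int) ∧ j < i + 1 := by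
        intro y hy'
        rcases List.mem_append.mp hy' with hy' | hy'
        · obtain ⟨j, h1, h2⟩ := I7 y hy'
          exact ⟨j, h1, by omega⟩
        · simp at hy'
          exact ⟨i, hy', by omega⟩
      have hpe1 : pvRbAux rc.toNat true (pvMemS (S ++ [((i : Nat) : Int)])) 0 (rl0.take (i + 1))
          = pvRbAux rc.toNat true (pvMemS S) 0 (rl0.take i)
            ++ List.replicate rc.toNat none := by
        have := pvPE1 rc.toNat true S i rl0 hin I7
        simpa using this
      have I1'' : ((idx + 1 + (rc.toNat - 1) : Nat) : Int)
          = ((i + 1 : Nat) : Int) + (offset + rc - 1) := by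
        push_cast [Nat.cast_sub (by omega : 1 ≤ rc.toNat), hk]
        omega
      have I3'' : ((i + 1 ≤ rl0.length ∧
            idx + 1 + (rc.toNat - 1)
              = (pvRbAux rc.toNat true (pvMemS (S ++ [((i : Nat) : Int)])) 0
                  (rl0.take (i + 1))).length)
          ∨ (rl0.length ≤ i + 1 ∧
              (pvPfx rc.toNat true (S ++ [((i : Nat) : Int)]) (i + 1) rl0).length
                ≤ idx + 1 + (rc.toNat - 1))) := by
        left
        refine ⟨by omega, ?_⟩
        rw [hpe1]
        simp only [List.length_append, List.length_replicate]
        omega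
      have I6'' : S ++ [((i : Nat) : Int)] ≠ [] → pvKeysOK dd0 rl0.length ∧
          ∀ k', (pvCmdParams.foldl (fun acc kv => acc.insert kv.1
              ((fun k'' v => v.take idx ++ List.replicate rc.toNat
                (if k'' == "repeat_list" then none else v.getD idx none) ++ v.drop (idx + 1))
                kv.1 (acc.getD kv.1 []))) dd).get? k'
            = (dd0.get? k').map (fun v =>
                if (pvCmdParams.map Prod.fst).contains k'
                then pvPfx rc.toNat (k' == "repeat_list") (S ++ [((i : Nat) : Int)])
                  (i + 1) v else v) := by
        intro
        refine ⟨hOK, fun k' => ?_⟩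
        rw [hgetA k', hOLD k']
        by_cases hc32 : (pvCmdParams.map Prod.fst).contains k' = true
        · rw [hc32, if_pos rfl]
          cases hdk : dd0.get? k' with
          | none => simp
          | some v0 =>
              obtain ⟨kv, hkv, hfst⟩ := List.mem_map.mp (List.contains_iff_mem.mp hc32)
              obtain ⟨pl, hpl, hlen⟩ := hOK kv hkv
              rw [hfst, hdk] at hpl
              have hlen0 : rl0.length ≤ v0.length := by
                rw [Option.some.inj hpl]; exact hlen
              have hiv : i < v0.length := by omega
              have hidxv : idx = (pvRbAux rc.toNat (k' == "repeat_list") (pvMemS S) 0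
                  (v0.take i)).length := by
                rw [hidx]
                exact pvRbAux_length_congr rc.toNat true (k' == "repeat_list") (pvMemS S)
                  (rl0.take i) (v0.take i) 0 (by simp; omega)
              have hfv := pvPfx_fire rc.toNat (k' == "repeat_list") S i v0 hiv I7 idx hidxv
              simp only [Option.map_some]
              rw [← hfv]
              rfl
        · have hc32' : (pvCmdParams.map Prod.fst).contains k' = false :=
            Bool.eq_false_iff.mpr hc32
          rw [hc32', if_neg (by simp)]
          cases hdk : dd0.get? k' with
          | none => simp
          | some v0 => simp
      refine pvLoopSim rc hrc dd0 rl0 cmd0 hnd0 HF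
        (i + 1) (offset + rc - 1)
        (cmd.take (((PySem.List.index? cmd (((i : Nat) : Int) + offset)).getD 0) + 1)
          ++ (cmd.drop (((PySem.List.index? cmd (((i : Nat) : Int) + offset)).getD 0) + 1)).map
            (fun v => v + rc - 1))
        (S ++ [((i : Nat) : Int)]) (idx + 1 + (rc.toNat - 1))
        _ _ I1'' rfl I3''
        (fun h => absurd h (by simp)) (hkeysA.trans I5) I6'' hS'lt
    · rw [dif_neg hfire, dif_neg hfire]
      have I2' : rlA = pvPfx rc.toNat true S (i + 1) rl0 := by
        rw [I2, pvPfx_step _ _ _ _ _ I7]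
      have I3' : ((i + 1 ≤ rl0.length ∧
          idx + 1 = (pvRbAux rc.toNat true (pvMemS S) 0 (rl0.take (i + 1))).length)
          ∨ (rl0.length ≤ i + 1 ∧ rlA.length ≤ idx + 1)) := by
        left
        refine ⟨by omega, ?_⟩
        rw [pvPE0 _ _ _ _ _ (pvMemS_of_lt_all S i i (le_refl i) I7), List.length_append, ← hidx]
        have : ((rl0.drop i).take 1).length = 1 := by simp; omega
        omega
      have I6' : S ≠ [] → pvKeysOK dd0 rl0.length ∧ ∀ k', dd.get? k'
          = (dd0.get? k').map (fun v =>
              if (pvCmdParams.map Prod.fst).contains k'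
              then pvPfx rc.toNat (k' == "repeat_list") S (i + 1) v else v) := by
        intro hS
        refine ⟨(I6 hS).1, fun k' => ?_⟩
        rw [(I6 hS).2 k']
        congr 1
        funext v
        by_cases hc : (pvCmdParams.map Prod.fst).contains k' = true
        · rw [if_pos hc, if_pos hc, pvPfx_step _ _ _ _ _ I7]
        · rw [if_neg hc, if_neg hc]
      exact pvLoopSim rc hrc dd0 rl0 cmd0 hnd0 HF (i + 1) offset cmd S (idx + 1) dd rlA
        (by push_cast at I1 ⊢; omega) I2' I3' I4 I5 I6'
        (fun y hy => by obtain ⟨j, h1, h2⟩ := I7 y hy; exact ⟨j, h1, by omega⟩)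
  · -- base: the scan is finished on both sides
    have hguard : ¬ (idx < rlA.length) := by
      rcases I3 with ⟨hle, hidx⟩ | ⟨hle, hlen⟩
      · have hlenA := pvPfx_length rc.toNat true S i rl0 idx hidx
        rw [← I2] at hlenA
        omega
      · omega
    rw [pvLoopA, dif_neg hguard, pvScanB, dif_neg hin]
    refine ⟨?_, rfl⟩
    by_cases hS : S = []
    · subst hS
      obtain ⟨-, -, hdd⟩ := I4 rfl
      rw [hdd]
      unfold pvFinal
      rw [if_pos (by simp)]
    · obtain ⟨hkOK, hget⟩ := I6 hS
      unfold pvFinal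
      rw [if_neg (by simpa [List.isEmpty_iff] using hS)]
      have hcont0 : ∀ kv ∈ pvCmdParams, dd0.contains kv.1 = true := by
        intro kv hkv
        obtain ⟨pl, hpl, -⟩ := hkOK kv hkv
        rw [PySem.Dict.contains_eq_isSome_get?, hpl]
        rfl
      have hndks : (pvCmdParams.map Prod.fst).Nodup := by decide
      obtain ⟨hkeysB, hgetB⟩ := pvFoldInsert
        (fun k v => pvRebuild rc.toNat (k == "repeat_list") (PySem.Set.ofList S) v)
        pvCmdParams dd0 hcont0 hndks
      have hndA : dd.keys.Nodup := I5 ▸ hnd0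
      have hndB : (pvCmdParams.foldl (fun acc kv =>
          acc.insert kv.1 (pvRebuild rc.toNat (kv.1 == "repeat_list") (PySem.Set.ofList S)
            (acc.getD kv.1 []))) dd0).keys.Nodup := by
        rw [hkeysB]; exact hnd0
      rw [PySem.Dict.items_eq_map_keys dd hndA [],
        PySem.Dict.items_eq_map_keys _ hndB [], I5, hkeysB]
      apply List.map_congr_left
      intro k hk
      have hks : dd0.contains k = true := (PySem.Dict.contains_iff_mem_keys dd0 k).mpr hk
      obtain ⟨v0, hv0⟩ : ∃ v0, dd0.get? k = some v0 := by
        have := PySem.Dict.contains_eq_isSome_get? (d := dd0) (k := k)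
        rw [hks] at this
        exact Option.isSome_iff_exists.mp this.symm
      have eA : dd.get? k = some (if (pvCmdParams.map Prod.fst).contains k
          then pvPfx rc.toNat (k == "repeat_list") S i v0 else v0) := by
        rw [hget k, hv0, Option.map_some]
      have eB := hgetB k
      by_cases hk32 : (pvCmdParams.map Prod.fst).contains k = true
      · rw [hk32, if_pos rfl] at eA eB
        rw [hv0, Option.map_some] at eB
        rw [PySem.Dict.getD_of_get?_eq_some dd [] eA,
          PySem.Dict.getD_of_get?_eq_some _ [] eB,
          pvRebuild_eq_pfx rc.toNat (k == "repeat_list") S i v0 I7]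
      · rw [Bool.eq_false_iff.mpr hk32, if_neg (by simp)] at eA eB
        rw [PySem.Dict.getD_of_get?_eq_some dd [] eA,
          PySem.Dict.getD_of_get?_eq_some _ [] (eB.trans hv0)]
  termination_by rl0.length - i
  decreasing_by
  all_goals omega

-- ===== VERDICT (by name: the statement is the Claim_ definition above) =====
theorem repeat_per_td_block_spec : Claim_equal_repeat_per_td_block := by
  intro details_dict cmd_loc_list hdom hpre
  unfold Spec_repeat_per_td_block
  obtain ⟨hlen2, hneq, hnodup, hsome, hfirepre⟩ := hpre
  have hrc := pvRepeatCount_pos cmd_loc_list hlen2 hneq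
  set rc := pvRepeatCount cmd_loc_list with hrcdef
  set dd0 := PySem.Dict.mk details_dict with hdd0
  set rl0 := (dd0.get? "repeat_list").getD [] with hrl0def
  have hrl0 : dd0.get? "repeat_list" = some rl0 := by
    obtain ⟨v, hv⟩ := Option.isSome_iff_exists.mp hsome
    rw [hrl0def, hv]
    rfl
  have hnd0 : dd0.keys.Nodup := by
    have hkeq : dd0.keys = details_dict.map Prod.fst := rfl
    rw [hkeq]
    exact hnodup
  have HF : (∃ i : Fin rl0.length, pvIsY rl0[(i : Nat)] = true ∧
      (((i : Nat) : Int) ∈ cmd_loc_list)) → pvKeysOK dd0 rl0.length := by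
    intro hex
    exact hfirepre hex
  have hsim := pvLoopSim rc hrc dd0 rl0 cmd_loc_list hnd0 HF 0 0 cmd_loc_list [] 0 dd0 rl0
    (by simp)
    (by rw [pvPfx_nil])
    (Or.inl ⟨Nat.zero_le _, by simp [pvRbAux]⟩)
    (fun _ => ⟨rfl, rfl, rfl⟩)
    rfl
    (fun h => absurd rfl h)
    (fun y hy => absurd hy (List.not_mem_nil))
  have halt : repeat_per_td_block_alt details_dict cmd_loc_list
      = ((pvFinal rc dd0 (pvScanB rc rl0 cmd_loc_list 0 0 []).1).items,
        (pvScanB rc rl0 cmd_loc_list 0 0 []).2) := by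
    show (if (pvScanB rc rl0 cmd_loc_list 0 0 []).1.isEmpty
        then (dd0.items, (pvScanB rc rl0 cmd_loc_list 0 0 []).2)
        else ((pvCmdParams.foldl (fun acc kv => acc.insert kv.1
            (pvRebuild rc.toNat (kv.1 == "repeat_list")
              (PySem.Set.ofList (pvScanB rc rl0 cmd_loc_list 0 0 []).1)
              (acc.getD kv.1 []))) dd0).items,
          (pvScanB rc rl0 cmd_loc_list 0 0 []).2))
      = _
    unfold pvFinal
    by_cases hc : (pvScanB rc rl0 cmd_loc_list 0 0 []).1.isEmpty = true
    · rw [if_pos hc, if_pos hc]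
    · rw [if_neg hc, if_neg hc]
  have ha : repeat_per_td_block details_dict cmd_loc_list
      = ((pvLoopA rc rl0 dd0 cmd_loc_list 0).1.items,
        (pvLoopA rc rl0 dd0 cmd_loc_list 0).2) := rfl
  rw [ha, halt]
  exact Prod.ext_iff.mpr ⟨hsim.1, hsim.2⟩
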